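-- pv_equiv track=rewrite | github.com/thierryxdp/TCC | problems/810/solution_245624.py | retira_pontuacao
-- ===== SOURCE A (Python) =====
-- def retira_pontuacao(texto):
--     """Dado um texto, retorna o texto sem as pontuações:
--     str-->str"""
--     pontos=['!','?','.','-',':',';',',','...']
--     for pontos in pontos:
--         texto=texto.replace('!',' ')
--         texto=texto.replace('?',' ')
--         texto=texto.replace('.',' ')
--         texto=texto.replace('-',' ')
--         texto=texto.replace(':',' ')
--         texto=texto.replace(';',' ')
--         texto=texto.replace(',',' ')
--         texto=texto.replace('...',' ')
--         texto=texto.lower()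
--         return texto
-- ===== SOURCE B (Python) =====
-- _PUNCT = frozenset('!?.-:;,')
--
-- def retira_pontuacao(texto):
--     """Dado um texto, retorna o texto sem as pontuações:
--     str-->str"""
--     return ''.join(' ' if ch in _PUNCT else ch for ch in texto).lower()
-- ===== Notes on version B (the rewrite author's own statement) =====
-- stated objective: idiomatic
-- what changed: A rescans the whole string with eight successive str.replace passes (the '...' pass is dead by then) plus a lower pass inside a loop that returns on its first iteration; B makes one character-by-character pass mapping the seven punctuation characters to a space and lowercases the joined result.
import Mathlib
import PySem

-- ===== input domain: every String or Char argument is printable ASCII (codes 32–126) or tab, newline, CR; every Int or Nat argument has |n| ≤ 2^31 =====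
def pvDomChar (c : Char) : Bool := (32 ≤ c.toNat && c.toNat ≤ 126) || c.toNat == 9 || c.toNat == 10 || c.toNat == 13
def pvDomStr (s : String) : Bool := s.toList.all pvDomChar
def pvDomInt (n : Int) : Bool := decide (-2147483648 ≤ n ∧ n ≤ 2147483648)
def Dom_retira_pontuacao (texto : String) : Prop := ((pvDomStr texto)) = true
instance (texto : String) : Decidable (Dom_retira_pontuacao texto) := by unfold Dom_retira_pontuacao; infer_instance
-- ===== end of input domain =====

-- B replaces A's eight full-string replace passes (plus a lower pass) with one
-- character-by-character pass mapping the seven punctuation characters to a space,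
-- then lowercasing; same return value (idiomatic rewrite).

-- ===== PORT A =====
-- A's 'for pontos in pontos' loop returns at the end of its first iteration,
-- so the body runs exactly once; ported as the straight-line sequence.
def retira_pontuacao (texto : String) : String :=
  let t := PySem.Str.replace texto "!" " "
  let t := PySem.Str.replace t "?" " "
  let t := PySem.Str.replace t "." " "
  let t := PySem.Str.replace t "-" " "
  let t := PySem.Str.replace t ":" " "
  let t := PySem.Str.replace t ";" " "
  let t := PySem.Str.replace t "," " "
  let t := PySem.Str.replace t "..." " "
  PySem.Str.lower t

-- ===== PORT B =====
def pvPunct : List Char := ['!', '?', '.', '-', ':', ';', ',']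

def retira_pontuacao_alt (texto : String) : String :=
  PySem.Str.lower
    (String.ofList (texto.toList.map (fun ch => if pvPunct.contains ch then ' ' else ch)))

-- ===== PRECONDITION & SPEC =====
def Spec_retira_pontuacao (texto : String) (out : String) : Prop := out = retira_pontuacao_alt texto
instance (texto : String) (out : String) : Decidable (Spec_retira_pontuacao texto out) := by unfold Spec_retira_pontuacao; infer_instance

-- ===== CLAIM (what is proved, stated in full; the proofs are below) =====
def Claim_equal_retira_pontuacao : Prop := ∀ (texto : String), Dom_retira_pontuacao texto → Spec_retira_pontuacao texto (retira_pontuacao texto)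

-- ===== LEMMAS AND PROOFS =====

-- Replacing a single character by a space is a pointwise map.
lemma go_single (p : Char) : ∀ (l : List Char) (fuel : Nat) (acc : List Char),
    l.length ≤ fuel →
    PySem.Chars.replace.go [p] [' '] fuel l acc
      = acc.reverse ++ l.map (fun c => if c = p then ' ' else c)
  | [], fuel, acc, _ => by cases fuel <;> simp [PySem.Chars.replace.go]
  | c :: t, 0, acc, h => by simp at h
  | c :: t, fuel + 1, acc, h => by
    by_cases hc : p = c
    · subst hc
      have := go_single p t fuel (' ' :: acc) (by simpa using h)
      simp [PySem.Chars.replace.go, List.isPrefixOf, this]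
    · have := go_single p t fuel (c :: acc) (by simpa using h)
      simp [PySem.Chars.replace.go, List.isPrefixOf, hc, Ne.symm hc, this]

lemma replace_single (p : Char) (l : List Char) :
    PySem.Chars.replace l [p] [' '] = l.map (fun c => if c = p then ' ' else c) := by
  simp [PySem.Chars.replace, go_single p l l.length [] le_rfl]

-- If the first character of 'old' never occurs, replace is the identity.
lemma go_absent (p : Char) (rest new : List Char) : ∀ (l : List Char) (fuel : Nat) (acc : List Char),
    l.length ≤ fuel → p ∉ l →
    PySem.Chars.replace.go (p :: rest) new fuel l acc = acc.reverse ++ l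
  | [], fuel, acc, _, _ => by cases fuel <;> simp [PySem.Chars.replace.go]
  | c :: t, 0, acc, h, _ => by simp at h
  | c :: t, fuel + 1, acc, h, hm => by
    have hpc : ¬ p = c := fun e => hm (e ▸ List.mem_cons_self ..)
    have := go_absent p rest new t fuel (c :: acc) (by simpa using h)
      (fun e => hm (List.mem_cons_of_mem _ e))
    simp [PySem.Chars.replace.go, List.isPrefixOf, hpc, this]

lemma replace_absent (p : Char) (rest new l : List Char) (hm : p ∉ l) :
    PySem.Chars.replace l (p :: rest) new = l := by
  simp [PySem.Chars.replace, go_absent p rest new l l.length [] le_rfl hm]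

lemma repl_ne_dot (p : Char) (c : Char) (h : c ≠ '.') :
    (if c = p then ' ' else c) ≠ '.' := by
  split_ifs with hp
  · decide
  · exact h

lemma dot_step_ne (x : Char) : (if x = '.' then ' ' else x) ≠ '.' := by
  split_ifs with hp
  · decide
  · exact hp

-- ===== VERDICT (by name: the statement is the Claim_ definition above) =====
set_option maxHeartbeats 1000000 in
theorem retira_pontuacao_spec : Claim_equal_retira_pontuacao := by
  intro texto _
  unfold Spec_retira_pontuacao retira_pontuacao retira_pontuacao_alt
  have h1 : ("!").toList = ['!'] := rfl
  have h2 : ("?").toList = ['?'] := rfl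
  have h3 : (".").toList = ['.'] := rfl
  have h4 : ("-").toList = ['-'] := rfl
  have h5 : (":").toList = [':'] := rfl
  have h6 : (";").toList = [';'] := rfl
  have h7 : (",").toList = [','] := rfl
  have hd : ("...").toList = ['.', '.', '.'] := rfl
  have hs : (" ").toList = [' '] := rfl
  simp only [PySem.Str.replace, PySem.Str.lower, String.toList_ofList, h1, h2, h3, h4, h5, h6, h7, hd, hs,
    replace_single]
  rw [replace_absent '.' ['.', '.'] [' ']]
  · congr 1
    simp only [PySem.Chars.lower, List.map_map]
    apply List.map_congr_left
    intro c hc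
    simp only [Function.comp]
    by_cases hm : c ∈ pvPunct
    · simp only [pvPunct, List.mem_cons, List.not_mem_nil, or_false] at hm
      rcases hm with rfl | rfl | rfl | rfl | rfl | rfl | rfl <;> decide
    · simp only [pvPunct, List.mem_cons, List.not_mem_nil, or_false, not_or] at hm
      obtain ⟨n1, n2, n3, n4, n5, n6, n7⟩ := hm
      simp [pvPunct, n1, n2, n3, n4, n5, n6, n7]
  · intro hmem
    simp only [List.map_map] at hmem
    rw [List.mem_map] at hmem
    obtain ⟨c, -, hc⟩ := hmem
    simp only [Function.comp_apply] at hc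
    exact absurd hc
      (repl_ne_dot ',' _ (repl_ne_dot ';' _ (repl_ne_dot ':' _ (repl_ne_dot '-' _ (dot_step_ne _)))))
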